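-- pv_equiv track=rewrite | github.com/shouenlee/mostec2016eecs | lab03.py | readInputs
-- ===== SOURCE A (Python) =====
-- inputs = [23,24,25,12]
--
-- def readInputs(new_readings,old_readings):
--     change = []
--     for x in range(len(inputs)):
--         if old_readings[x]==True and new_readings[x] == False:
--             change.append(True)
--         else:
--             change.append(False)
--     if change[3]:
--         return 'next_song'
--     if change[2]:
--         return 'pause_unpause'
--     if change[0]:
--         return 'volup'
--     if change[1]:
--         return 'voldown'
-- ===== SOURCE B (Python) =====
-- # B: encode the four release edges into a 4-bit integer and return a value from a
-- # 16-entry lookup table precomputed once; no intermediate list, no runtime priority branching.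
--
-- _TABLE = []
-- for _code in range(16):
--     if _code & 8:
--         _TABLE.append('next_song')
--     elif _code & 4:
--         _TABLE.append('pause_unpause')
--     elif _code & 1:
--         _TABLE.append('volup')
--     elif _code & 2:
--         _TABLE.append('voldown')
--     else:
--         _TABLE.append(None)
--
-- def readInputs(new_readings, old_readings):
--     code = 0
--     for x in range(4):
--         if old_readings[x] == True and new_readings[x] == False:
--             code |= 1 << x
--     return _TABLE[code]
-- ===== Notes on version B (the rewrite author's own statement) =====
-- stated objective: alternative
-- what changed: Replaces A's build-a-4-element-change-list-then-four-priority-ifs by encoding the release edges as a 4-bit integer and indexing a 16-entry command table precomputed once at import, so no per-call priority branching or intermediate list.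
import Mathlib
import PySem

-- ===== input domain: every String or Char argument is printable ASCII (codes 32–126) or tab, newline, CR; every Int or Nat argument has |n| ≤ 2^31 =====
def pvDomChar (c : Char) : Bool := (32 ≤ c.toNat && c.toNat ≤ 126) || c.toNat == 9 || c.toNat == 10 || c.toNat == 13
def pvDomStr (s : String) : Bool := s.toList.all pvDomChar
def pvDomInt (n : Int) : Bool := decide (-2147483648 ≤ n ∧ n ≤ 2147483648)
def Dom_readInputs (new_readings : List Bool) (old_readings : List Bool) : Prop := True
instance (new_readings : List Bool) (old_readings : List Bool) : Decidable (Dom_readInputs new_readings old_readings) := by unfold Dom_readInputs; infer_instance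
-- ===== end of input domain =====

-- B encodes the four release edges into a 4-bit integer and returns a value from a 16-entry
-- lookup table built once; no intermediate change list, no runtime priority branching (objective: alternative).

-- ===== PORT A =====
-- The loop builds the 4-element `change` list; list indexing may raise (none).
-- `old_readings[x]==True and new_readings[x]==False` short-circuits: new is only indexed when old[x] is true.
def readInputsChange (new_readings : List Bool) (old_readings : List Bool) : Option (List Bool) :=
  (List.range 4).foldl (fun acc (x : Nat) =>
    acc.bind fun ch =>
      match PySem.List.pyGet? old_readings (x : Int) with
      | none => none
      | some o =>
        if o == true then
          match PySem.List.pyGet? new_readings (x : Int) with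
          | none => none
          | some nv => some (ch ++ [nv == false])
        else some (ch ++ [false])) (some [])

def readInputs (new_readings : List Bool) (old_readings : List Bool) : Option String :=
  match readInputsChange new_readings old_readings with
  | none => none   -- IndexError in the loop (excluded by Pre_)
  | some ch =>
    -- `change` always has exactly 4 elements here, so change[3] … never raises
    if ch.getD 3 false then some "next_song"
    else if ch.getD 2 false then some "pause_unpause"
    else if ch.getD 0 false then some "volup"
    else if ch.getD 1 false then some "voldown"
    else none

-- ===== PORT B =====
-- module-level `_TABLE`, built once by the same loop over range(16) as Source B
def readInputsTable : List (Option String) :=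
  (List.range 16).foldl (fun acc (code : Nat) =>
    acc ++ [if code &&& 8 ≠ 0 then some "next_song"
            else if code &&& 4 ≠ 0 then some "pause_unpause"
            else if code &&& 1 ≠ 0 then some "volup"
            else if code &&& 2 ≠ 0 then some "voldown"
            else none]) []

-- the loop computing `code`; indexing may raise (none), with Python's short-circuit `and`
def readInputsCode (new_readings : List Bool) (old_readings : List Bool) : Option Nat :=
  (List.range 4).foldl (fun acc (x : Nat) =>
    acc.bind fun code =>
      match PySem.List.pyGet? old_readings (x : Int) with
      | none => none
      | some o =>
        if o == true then
          match PySem.List.pyGet? new_readings (x : Int) with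
          | none => none
          | some nv => some (if nv == false then code ||| ((1 : Nat) <<< x) else code)
        else some code) (some 0)

def readInputs_alt (new_readings : List Bool) (old_readings : List Bool) : Option String :=
  match readInputsCode new_readings old_readings with
  | none => none   -- IndexError in the loop (excluded by Pre_)
  | some code =>
    -- `code` is always in 0..15, so `_TABLE[code]` never raises
    match PySem.List.pyGet? readInputsTable (code : Int) with
    | none => none
    | some r => r

-- ===== PRECONDITION & SPEC =====
-- Pre_ excludes exactly the inputs on which A raises IndexError: old_readings needs indices 0..3,
-- and new_readings[x] is only read (hence needed) at those x where old_readings[x] is true.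
def Pre_readInputs (new_readings : List Bool) (old_readings : List Bool) : Prop :=
  4 ≤ old_readings.length ∧
  (old_readings.getD 0 false = true → 1 ≤ new_readings.length) ∧
  (old_readings.getD 1 false = true → 2 ≤ new_readings.length) ∧
  (old_readings.getD 2 false = true → 3 ≤ new_readings.length) ∧
  (old_readings.getD 3 false = true → 4 ≤ new_readings.length)
instance (new_readings : List Bool) (old_readings : List Bool) : Decidable (Pre_readInputs new_readings old_readings) := by unfold Pre_readInputs; infer_instance

def pvWitness_readInputs : List Bool × List Bool := ([false, true, false, false], [true, true, false, true])

def Spec_readInputs (new_readings : List Bool) (old_readings : List Bool) (out : Option String) : Prop := out = readInputs_alt new_readings old_readings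
instance (new_readings : List Bool) (old_readings : List Bool) (out : Option String) : Decidable (Spec_readInputs new_readings old_readings out) := by unfold Spec_readInputs; infer_instance

-- ===== CLAIM (what is proved, stated in full; the proofs are below) =====
def Claim_equal_readInputs : Prop := ∀ (new_readings : List Bool) (old_readings : List Bool), Dom_readInputs new_readings old_readings → Pre_readInputs new_readings old_readings → Spec_readInputs new_readings old_readings (readInputs new_readings old_readings)

-- ===== LEMMAS AND PROOFS =====
@[simp] theorem pvGet0 (x : Bool) (t : List Bool) : PySem.List.pyGet? (x :: t) (0 : Int) = some x := by
  simp [PySem.List.pyGet?, PySem.List.pyIdx?]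
@[simp] theorem pvGet1 (x y : Bool) (t : List Bool) : PySem.List.pyGet? (x :: y :: t) (1 : Int) = some y := by
  simp [PySem.List.pyGet?, PySem.List.pyIdx?]
@[simp] theorem pvGet2 (x y z : Bool) (t : List Bool) : PySem.List.pyGet? (x :: y :: z :: t) (2 : Int) = some z := by
  simp [PySem.List.pyGet?, PySem.List.pyIdx?,
    show (2 : Int) ≤ (t.length : Int) + 1 + 1 by push_cast; omega]
@[simp] theorem pvGet3 (x y z w : Bool) (t : List Bool) : PySem.List.pyGet? (x :: y :: z :: w :: t) (3 : Int) = some w := by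
  simp [PySem.List.pyGet?, PySem.List.pyIdx?,
    show (3 : Int) ≤ (t.length : Int) + 1 + 1 + 1 by push_cast; omega]

-- ===== VERDICT (by name: the statement is the Claim_ definition above) =====
set_option maxHeartbeats 1000000 in
theorem readInputs_spec : Claim_equal_readInputs := by
  intro new old _ pre
  obtain ⟨h4, h0, h1, h2, h3⟩ := pre
  unfold Spec_readInputs
  rcases old with _ | ⟨o0, _ | ⟨o1, _ | ⟨o2, _ | ⟨o3, ro⟩⟩⟩⟩ <;> simp at h4
  simp only [List.getD, List.getElem?_cons_zero, List.getElem?_cons_succ, Option.getD_some] at h0 h1 h2 h3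
  cases o3 <;> cases o2 <;> cases o1 <;> cases o0 <;>
    rcases new with _ | ⟨n0, _ | ⟨n1, _ | ⟨n2, _ | ⟨n3, rn⟩⟩⟩⟩ <;>
    first
      | (exfalso;
         simp only [eq_self_iff_true, true_implies, Bool.false_eq_true, false_implies,
           List.length_nil, List.length_cons] at h0 h1 h2 h3;
         omega)
      | (simp [readInputs, readInputs_alt, readInputsChange, readInputsCode, readInputsTable,
          List.range_succ] <;> split_ifs <;> rfl)
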